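-- pv_equiv track=rewrite | github.com/ristavor/switchyomegageneraterules | except-ru.py | optimize_domains
-- ===== SOURCE A (Python) =====
-- def optimize_domains(domains):
--     # Сортируем домены в порядке увеличения длины (от самых коротких к самым длинным)
--     sorted_domains = sorted(domains, key=lambda x: x.count("."))
--
--     # Убираем поддомены, которые покрываются более общими доменами
--     optimized_domains = set()
--     for domain in sorted_domains:
--         if not any(
--             domain.endswith(f".{existing}") or domain == existing
--             for existing in optimized_domains
--         ):
--             optimized_domains.add(domain)
--
--     return optimized_domains
-- ===== SOURCE B (Python) =====
-- def optimize_domains(domains):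
--     # A domain survives iff none of its label-boundary parent suffixes occurs
--     # anywhere in the input: test each suffix against one precomputed set
--     # instead of scanning the kept set with endswith for every domain.
--     pool = set(domains)
--     optimized = set()
--     for d in sorted(domains, key=lambda x: x.count(".")):
--         if not any(d[i + 1:] in pool for i, ch in enumerate(d) if ch == "."):
--             optimized.add(d)
--     return optimized
-- ===== Notes on version B (the rewrite author's own statement) =====
-- stated objective: faster
-- what changed: Instead of testing each domain with endswith against every already-kept domain (inner scan of the growing result set), B precomputes one set of all input domains and keeps a domain iff none of its label-boundary parent suffixes is in that set, so the inner scan over the kept set disappears.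
import Mathlib
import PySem

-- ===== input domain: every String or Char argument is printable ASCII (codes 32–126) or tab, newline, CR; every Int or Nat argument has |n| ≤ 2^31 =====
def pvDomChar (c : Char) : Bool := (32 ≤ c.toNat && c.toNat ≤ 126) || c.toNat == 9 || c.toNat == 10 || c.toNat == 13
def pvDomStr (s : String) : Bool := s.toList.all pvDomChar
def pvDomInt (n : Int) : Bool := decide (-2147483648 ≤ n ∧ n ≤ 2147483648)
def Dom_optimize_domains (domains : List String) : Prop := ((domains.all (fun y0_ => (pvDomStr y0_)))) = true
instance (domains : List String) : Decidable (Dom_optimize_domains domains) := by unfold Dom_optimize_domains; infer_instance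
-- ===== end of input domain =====

-- B replaces A's inner endswith-scan of the growing result set by membership tests of each
-- domain's label-boundary suffixes in one precomputed set of all inputs (objective: faster).

-- ===== PORT A =====
def optimize_domains (domains : List String) : List String :=
  let sorted_domains := PySem.List.sorted domains (fun x => PySem.Str.count x ".") false
  sorted_domains.foldl
    (fun optimized domain =>
      if optimized.any (fun existing =>
          PySem.Str.endswith domain ("." ++ existing) || domain == existing) then
        optimized
      else PySem.Set.add optimized domain)
    PySem.Set.empty

-- ===== PORT B =====
def optimize_domains_alt (domains : List String) : List String :=
  let pool : PySem.Set String := PySem.Set.ofList domains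
  (PySem.List.sorted domains (fun x => PySem.Str.count x ".") false).foldl
    (fun optimized d =>
      if (PySem.List.enumerate d.toList 0).any (fun p =>
            p.2 == '.' && PySem.Set.contains pool (PySem.Str.slice d (some (p.1 + 1)) none)) then
        optimized
      else PySem.Set.add optimized d)
    PySem.Set.empty

-- ===== PRECONDITION & SPEC =====
def Spec_optimize_domains (domains : List String) (out : List String) : Prop := out = optimize_domains_alt domains
instance (domains : List String) (out : List String) : Decidable (Spec_optimize_domains domains out) := by unfold Spec_optimize_domains; infer_instance

-- ===== CLAIM (what is proved, stated in full; the proofs are below) =====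
def Claim_equal_optimize_domains : Prop := ∀ (domains : List String), Dom_optimize_domains domains → Spec_optimize_domains domains (optimize_domains domains)

-- ===== LEMMAS AND PROOFS =====

-- number of '.' in a string (A's sort key)
def keyOf (x : String) : Nat := PySem.Str.count x "."

-- the suffix d[i+1:]
def sufStr (d : String) (i : Nat) : String := PySem.Str.slice d (some ((i : Int) + 1)) none

-- B's per-domain test: some label-boundary parent suffix of d occurs in domains
def condB (domains : List String) (d : String) : Bool :=
  (PySem.List.enumerate d.toList 0).any (fun p =>
    p.2 == '.' && PySem.Set.contains (PySem.Set.ofList domains) (PySem.Str.slice d (some (p.1 + 1)) none))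

theorem alt_eq (domains : List String) :
    optimize_domains_alt domains =
      (PySem.List.sorted domains (fun x => PySem.Str.count x ".") false).foldl
        (fun S d => if condB domains d then S else PySem.Set.add S d) PySem.Set.empty := rfl

theorem count_go_singleton (c : Char) :
    ∀ (fuel : Nat) (l : List Char) (acc : Nat), l.length ≤ fuel →
      PySem.Chars.count.go [c] fuel l acc = acc + l.count c := by
  intro fuel
  induction fuel with
  | zero => intro l acc h; cases l with
    | nil => simp [PySem.Chars.count.go]
    | cons x t => simp at h
  | succ n ih =>
    intro l acc h
    cases l with
    | nil => simp [PySem.Chars.count.go]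
    | cons x t =>
      by_cases hx : x = c
      · subst hx
        have : [x].isPrefixOf (x :: t) = true := by simp [List.isPrefixOf]
        simp only [PySem.Chars.count.go, this, if_pos]
        rw [ih]
        · simp; omega
        · simpa using Nat.le_of_succ_le_succ h
      · have : [c].isPrefixOf (x :: t) = false := by
          simp [List.isPrefixOf]; exact fun hcx => (hx hcx.symm).elim
        simp only [PySem.Chars.count.go, this, if_neg, Bool.false_eq_true, not_false_iff]
        rw [ih]
        · simp [hx]
        · exact Nat.le_of_succ_le_succ h

theorem keyOf_eq (x : String) : keyOf x = x.toList.count '.' := by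
  have hne : (String.toList ".").isEmpty = false := by decide
  have : PySem.Str.count x "." = PySem.Chars.count x.toList ".".toList := by
    simp [PySem.Str.count_eq]
  rw [keyOf, this]
  have hdot : ".".toList = ['.'] := by decide
  rw [hdot, PySem.Chars.count]
  have hfx : x.toList.length ≤ x.length := by simp
  simp [count_go_singleton '.' x.length x.toList 0 hfx]

theorem dotSuffix_iff (t l : List Char) :
    ('.' :: t) <:+ l ↔ ∃ i : Nat, l[i]? = some '.' ∧ l.drop (i+1) = t := by
  constructor
  · rintro ⟨u, hu⟩
    refine ⟨u.length, ?_, ?_⟩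
    · rw [← hu]; simp
    · rw [← hu, show u ++ '.' :: t = (u ++ ['.']) ++ t by simp,
        show u.length + 1 = (u ++ ['.']).length by simp]
      exact List.drop_left
  · rintro ⟨i, hget, hdrop⟩
    have hi : i < l.length := by
      by_contra h
      rw [List.getElem?_eq_none (by omega)] at hget
      simp at hget
    refine ⟨l.take i, ?_⟩
    have hgete : l[i] = '.' := by
      have h2 := List.getElem?_eq_getElem hi
      rw [h2] at hget; exact Option.some.inj hget
    have hsplit : l.drop i = '.' :: l.drop (i+1) := by
      rw [List.drop_eq_getElem_cons hi, hgete]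
    rw [hdrop] at hsplit
    rw [← hsplit, List.take_append_drop]

theorem sufStr_toList (d : String) (i : Nat) :
    (sufStr d i).toList = d.toList.drop (i+1) := by
  have h1 : ((i : Int) + 1) = ((i + 1 : Nat) : Int) := by push_cast; ring
  rw [sufStr, h1]
  rw [PySem.Str.toList_slice, PySem.Chars.slice_eq_listSlice, PySem.List.slice_from_natCast]

theorem toList_inj {s t : String} (h : s.toList = t.toList) : s = t := by
  have h2 := congrArg String.ofList h
  simpa using h2

theorem condB_iff (domains : List String) (d : String) :
    condB domains d = true ↔
      ∃ i : Nat, d.toList[i]? = some '.' ∧ sufStr d i ∈ domains := by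
  unfold condB
  rw [List.any_eq_true]
  constructor
  · rintro ⟨p, hp, hcond⟩
    rw [PySem.List.mem_enumerate_iff] at hp
    obtain ⟨k, hk, rfl⟩ := hp
    simp only [Bool.and_eq_true, beq_iff_eq] at hcond
    obtain ⟨hdot, hmem⟩ := hcond
    rw [PySem.Set.contains_iff, PySem.Set.mem_ofList] at hmem
    refine ⟨k, ?_, ?_⟩
    · rw [List.getElem?_eq_getElem hk, hdot]
    · have : PySem.Str.slice d (some ((0 : Int) + k + 1)) none = sufStr d k := by
        unfold sufStr; norm_num
      rwa [this] at hmem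
  · rintro ⟨i, hget, hmem⟩
    have hi : i < d.toList.length := by
      by_contra h
      rw [List.getElem?_eq_none (by omega)] at hget
      simp at hget
    refine ⟨((0 : Int) + i, d.toList[i]), ?_, ?_⟩
    · rw [PySem.List.mem_enumerate_iff]; exact ⟨i, hi, rfl⟩
    · simp only [Bool.and_eq_true, beq_iff_eq]
      constructor
      · have h2 := List.getElem?_eq_getElem hi
        rw [h2] at hget; exact Option.some.inj hget
      · rw [PySem.Set.contains_iff, PySem.Set.mem_ofList]
        have : PySem.Str.slice d (some ((0 : Int) + i + 1)) none = sufStr d i := by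
          unfold sufStr; norm_num
        rwa [this]

theorem endswith_dot_iff (d e : String) :
    (PySem.Str.endswith d ("." ++ e) = true) ↔ ('.' :: e.toList) <:+ d.toList := by
  rw [PySem.Str.endswith_eq, PySem.Chars.endswith_iff]
  have : ("." ++ e).toList = '.' :: e.toList := by
    rw [String.toList_append]; rfl
  rw [this]

-- a covering parent in domains forces a strictly smaller key
theorem key_lt_of_suffix (d : String) (i : Nat) (hget : d.toList[i]? = some '.') :
    keyOf (sufStr d i) < keyOf d := by
  have hi : i < d.toList.length := by
    by_contra h
    rw [List.getElem?_eq_none (by omega)] at hget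
    simp at hget
  rw [keyOf_eq, keyOf_eq, sufStr_toList]
  have hsplit : d.toList = d.toList.take i ++ '.' :: d.toList.drop (i+1) := by
    have hgete : d.toList[i] = '.' := by
      have h2 := List.getElem?_eq_getElem hi
      rw [h2] at hget; exact Option.some.inj hget
    have h3 : d.toList.drop i = '.' :: d.toList.drop (i+1) := by
      rw [List.drop_eq_getElem_cons hi, hgete]
    conv_lhs => rw [← List.take_append_drop i d.toList]
    rw [h3]
  conv_rhs => rw [hsplit]
  rw [List.count_append, List.count_cons]
  simp
  omega

-- an innermost covering parent exists, by induction on the dot count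
theorem exists_good_parent_aux (domains : List String) :
    ∀ (n : Nat) (d : String), keyOf d ≤ n → condB domains d = true →
      ∃ s : String, s ∈ domains ∧ condB domains s = false ∧ keyOf s < keyOf d ∧
        ('.' :: s.toList) <:+ d.toList := by
  intro n
  induction n with
  | zero =>
    intro d hle h
    obtain ⟨i, hget, _⟩ := (condB_iff domains d).mp h
    have := key_lt_of_suffix d i hget
    omega
  | succ n ih =>
    intro d hle h
    obtain ⟨i, hget, hmem⟩ := (condB_iff domains d).mp h
    have hklt := key_lt_of_suffix d i hget
    have hsuf : ('.' :: (sufStr d i).toList) <:+ d.toList :=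
      (dotSuffix_iff _ _).mpr ⟨i, hget, (sufStr_toList d i).symm⟩
    by_cases hc : condB domains (sufStr d i) = true
    · obtain ⟨s', hs'dom, hs'c, hs'k, hs'suf⟩ := ih (sufStr d i) (by omega) hc
      refine ⟨s', hs'dom, hs'c, by omega, ?_⟩
      exact hs'suf.trans ((List.suffix_cons '.' _).trans hsuf)
    · rw [Bool.not_eq_true] at hc
      exact ⟨sufStr d i, hmem, hc, hklt, hsuf⟩

theorem exists_good_parent (domains : List String) (d : String)
    (h : condB domains d = true) :
    ∃ s : String, s ∈ domains ∧ condB domains s = false ∧ keyOf s < keyOf d ∧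
      ('.' :: s.toList) <:+ d.toList :=
  exists_good_parent_aux domains (keyOf d) d (le_refl _) h

-- ===== main induction =====
theorem fold_eq (domains : List String) :
    ∀ (rest p : List String) (S : List String),
      (p ++ rest).Perm domains →
      (p ++ rest).Pairwise (fun a b => keyOf a ≤ keyOf b) →
      (∀ x, x ∈ S ↔ x ∈ p ∧ condB domains x = false) →
      rest.foldl (fun optimized domain =>
          if optimized.any (fun existing =>
              PySem.Str.endswith domain ("." ++ existing) || domain == existing) then
            optimized
          else PySem.Set.add optimized domain) S =
        rest.foldl (fun S d => if condB domains d then S else PySem.Set.add S d) S := by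
  intro rest
  induction rest with
  | nil => intro p S _ _ _; rfl
  | cons d rest' ih =>
    intro p S hperm hsort hinv
    have hperm' : ((p ++ [d]) ++ rest').Perm domains := by
      simpa [List.append_assoc] using hperm
    have hsort' : ((p ++ [d]) ++ rest').Pairwise (fun a b => keyOf a ≤ keyOf b) := by
      simpa [List.append_assoc] using hsort
    by_cases hcb : condB domains d = true
    · -- d is covered: both sides skip
      obtain ⟨s0, hs0dom, hs0cond, hs0key, hs0suf⟩ := exists_good_parent domains d hcb
      -- s0 is in p
      have hs0p : s0 ∈ p := by
        have hs0in : s0 ∈ p ++ d :: rest' := hperm.symm.mem_iff.mp hs0dom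
        rcases List.mem_append.mp hs0in with h | h
        · exact h
        · exfalso
          have hpair : (d :: rest').Pairwise (fun a b => keyOf a ≤ keyOf b) :=
            hsort.sublist (List.sublist_append_right p _)
          rcases List.mem_cons.mp h with h | h
          · subst h; omega
          · have := (List.pairwise_cons.mp hpair).1 s0 h
            omega
      have hs0S : s0 ∈ S := (hinv s0).mpr ⟨hs0p, hs0cond⟩
      have hany : S.any (fun existing =>
          PySem.Str.endswith d ("." ++ existing) || d == existing) = true := by
        rw [List.any_eq_true]
        refine ⟨s0, hs0S, ?_⟩
        rw [Bool.or_eq_true]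
        left
        rw [endswith_dot_iff]
        exact hs0suf
      simp only [List.foldl_cons, hany, if_pos, hcb]
      apply ih (p ++ [d]) S hperm' hsort'
      intro x
      rw [hinv x]
      constructor
      · rintro ⟨hx, hc⟩; exact ⟨List.mem_append.mpr (Or.inl hx), hc⟩
      · rintro ⟨hx, hc⟩
        rcases List.mem_append.mp hx with h | h
        · exact ⟨h, hc⟩
        · simp at h; subst h; rw [hcb] at hc; exact absurd hc (by simp)
    · -- d is not covered
      rw [Bool.not_eq_true] at hcb
      have hstep : (if S.any (fun existing =>
            PySem.Str.endswith d ("." ++ existing) || d == existing) then S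
          else PySem.Set.add S d) = PySem.Set.add S d := by
        by_cases hdS : d ∈ S
        · rw [PySem.Set.add_of_mem hdS]
          split <;> rfl
        · have hany : S.any (fun existing =>
              PySem.Str.endswith d ("." ++ existing) || d == existing) = false := by
            rw [Bool.eq_false_iff]
            intro hany
            rw [List.any_eq_true] at hany
            obtain ⟨e, heS, hcond⟩ := hany
            rw [Bool.or_eq_true] at hcond
            rcases hcond with h | h
            · -- endswith gives a covering parent in domains: condB d would be true
              rw [endswith_dot_iff, dotSuffix_iff] at h
              obtain ⟨i, hget, hdrop⟩ := h
              have hedom : e ∈ domains := by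
                have hep : e ∈ p := ((hinv e).mp heS).1
                exact hperm.mem_iff.mp (List.mem_append.mpr (Or.inl hep))
              have : condB domains d = true := by
                rw [condB_iff]
                refine ⟨i, hget, ?_⟩
                have : sufStr d i = e := toList_inj (by rw [sufStr_toList, hdrop])
                rwa [this]
              rw [this] at hcb; exact absurd hcb (by simp)
            · rw [beq_iff_eq] at h; subst h; exact hdS heS
          rw [hany]
          simp
      simp only [List.foldl_cons, hstep, hcb]
      simp only [Bool.false_eq_true, if_false]
      apply ih (p ++ [d]) (PySem.Set.add S d) hperm' hsort'
      intro x
      rw [PySem.Set.mem_add, hinv x]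
      constructor
      · rintro (⟨hx, hc⟩ | rfl)
        · exact ⟨List.mem_append.mpr (Or.inl hx), hc⟩
        · exact ⟨List.mem_append.mpr (Or.inr (by simp)), hcb⟩
      · rintro ⟨hx, hc⟩
        rcases List.mem_append.mp hx with h | h
        · exact Or.inl ⟨h, hc⟩
        · simp at h; subst h; exact Or.inr rfl

-- ===== VERDICT (by name: the statement is the Claim_ definition above) =====
theorem optimize_domains_spec : Claim_equal_optimize_domains := by
  intro domains _
  unfold Spec_optimize_domains
  rw [alt_eq]
  unfold optimize_domains
  have hkey : (fun x => PySem.Str.count x ".") = keyOf := rfl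
  have hperm : ([] ++ PySem.List.sorted domains (fun x => PySem.Str.count x ".") false).Perm domains := by
    simpa using PySem.List.sorted_perm domains (fun x => PySem.Str.count x ".") false
  have hsort : ([] ++ PySem.List.sorted domains (fun x => PySem.Str.count x ".") false).Pairwise
      (fun a b => keyOf a ≤ keyOf b) := by
    simpa using PySem.List.sorted_pairwise domains (fun x => PySem.Str.count x ".")
  exact fold_eq domains _ [] PySem.Set.empty hperm hsort (by intro x; simp [PySem.Set.empty])
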